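-- pv_equiv track=rewrite | github.com/linhnt31/Python | Competitive Progamming/CodeSignal/Tourements/25_3_2019.py | differentValues
-- ===== SOURCE A (Python) =====
-- def differentValues(a, d):
--
--     best = -1
--     for i in range(len(a)):
--         for j in range(i + 1, len(a)):
--             diff = abs(a[i] - a[j])
--             if diff <= d and best < diff:
--                 best = diff
--
--     return best
-- ===== SOURCE B (Python) =====
-- def differentValues(a, d):
--     s = sorted(a)
--     n = len(s)
--     best = -1
--     for i in range(n):
--         # binary search: first index in (i, n) whose value exceeds s[i] + d
--         lo = i + 1
--         hi = n
--         while lo < hi: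
--             mid = (lo + hi) // 2
--             if s[mid] <= s[i] + d:
--                 lo = mid + 1
--             else:
--                 hi = mid
--         if lo - 1 > i:
--             c = s[lo - 1] - s[i]
--             if c > best:
--                 best = c
--     return best
-- ===== Notes on version B (the rewrite author's own statement) =====
-- stated objective: faster
-- what changed: Replaces the quadratic all-pairs scan with sort followed by a per-index binary search for the farthest element within d.
import Mathlib
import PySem

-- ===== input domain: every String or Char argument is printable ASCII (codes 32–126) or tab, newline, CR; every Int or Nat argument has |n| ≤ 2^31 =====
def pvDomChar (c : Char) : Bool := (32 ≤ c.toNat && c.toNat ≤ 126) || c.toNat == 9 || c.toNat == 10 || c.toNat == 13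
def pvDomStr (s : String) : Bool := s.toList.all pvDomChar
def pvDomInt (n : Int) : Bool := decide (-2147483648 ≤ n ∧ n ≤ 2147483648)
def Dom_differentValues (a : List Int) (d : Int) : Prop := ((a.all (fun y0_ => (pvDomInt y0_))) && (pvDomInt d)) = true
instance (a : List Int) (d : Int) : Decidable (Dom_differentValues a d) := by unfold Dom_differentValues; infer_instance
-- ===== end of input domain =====

-- B replaces A's quadratic all-pairs scan by sort + per-index binary search (faster: O(n log n) vs O(n^2)).

-- ===== PORT A =====
def differentValues (a : List Int) (d : Int) : Int :=
  (PySem.List.pyRange 0 (a.length : Int) 1).foldl (fun best i =>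
    (PySem.List.pyRange (i + 1) (a.length : Int) 1).foldl (fun best j =>
      let diff := |PySem.List.pyGetD a i 0 - PySem.List.pyGetD a j 0|
      if diff ≤ d ∧ best < diff then diff else best) best) (-1)

-- ===== PORT B =====
-- transcription of Source B's hand-written while-loop binary search; the fuel argument only
-- guards totality (hi - lo shrinks each iteration, so fuel ≥ hi - lo always suffices)
def bsearchGt (s : List Int) (x : Int) : Nat → Nat → Nat → Nat
  | 0, lo, _hi => lo
  | fuel + 1, lo, hi =>
    if lo < hi then
      let mid := (lo + hi) / 2
      if s.getD mid 0 ≤ x then bsearchGt s x fuel (mid + 1) hi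
      else bsearchGt s x fuel lo mid
    else lo

def differentValues_alt (a : List Int) (d : Int) : Int :=
  let s := PySem.List.sorted a (fun x => x) false
  let n := s.length
  (List.range n).foldl (fun best i =>
    let lo := bsearchGt s (s.getD i 0 + d) (n + 1) (i + 1) n
    if lo - 1 > i then
      let c := s.getD (lo - 1) 0 - s.getD i 0
      if c > best then c else best
    else best) (-1)

-- ===== PRECONDITION & SPEC =====
def Spec_differentValues (a : List Int) (d : Int) (out : Int) : Prop := out = differentValues_alt a d
instance (a : List Int) (d : Int) (out : Int) : Decidable (Spec_differentValues a d out) := by unfold Spec_differentValues; infer_instance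

-- ===== CLAIM (what is proved, stated in full; the proofs are below) =====
def Claim_equal_differentValues : Prop := ∀ (a : List Int) (d : Int), Dom_differentValues a d → Spec_differentValues a d (differentValues a d)

-- ===== LEMMAS AND PROOFS =====

-- v is the absolute difference of some pair of positions i < j of l
def PairGood (l : List Int) (v : Int) : Prop :=
  ∃ i j, ∃ hi : i < l.length, ∃ hj : j < l.length, i < j ∧ v = |l[i] - l[j]|

-- m is what both programs are meant to return: the largest pair difference ≤ d, or -1 if none
def IsMaxAns (l : List Int) (d m : Int) : Prop :=
  (∀ v, PairGood l v → v ≤ d → v ≤ m) ∧ (m = -1 ∨ (PairGood l m ∧ m ≤ d))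

lemma pairGood_nonneg {l : List Int} {v : Int} (h : PairGood l v) : 0 ≤ v := by
  obtain ⟨i, j, hi, hj, _, rfl⟩ := h
  exact abs_nonneg _

lemma isMaxAns_unique {l : List Int} {d m₁ m₂ : Int}
    (h₁ : IsMaxAns l d m₁) (h₂ : IsMaxAns l d m₂) : m₁ = m₂ := by
  obtain ⟨ub₁, c₁⟩ := h₁
  obtain ⟨ub₂, c₂⟩ := h₂
  rcases c₁ with rfl | ⟨g₁, le₁⟩ <;> rcases c₂ with rfl | ⟨g₂, le₂⟩
  · rfl
  · exact absurd (ub₁ _ g₂ le₂) (by have := pairGood_nonneg g₂; omega)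
  · exact absurd (ub₂ _ g₁ le₁) (by have := pairGood_nonneg g₁; omega)
  · exact le_antisymm (ub₂ _ g₁ le₁) (ub₁ _ g₂ le₂)

lemma pairGood_iff_val {l : List Int} {v : Int} :
    PairGood l v ↔ ((0 < v ∧ ∃ x ∈ l, ∃ y ∈ l, x - y = v) ∨ (v = 0 ∧ ¬ l.Nodup)) := by
  constructor
  · rintro ⟨i, j, hi, hj, hij, rfl⟩
    by_cases he : l[i] = l[j]
    · refine Or.inr ⟨by simp [he], fun hn => ?_⟩
      have hinj := List.nodup_iff_injective_get.mp hn
        (a₁ := ⟨i, hi⟩) (a₂ := ⟨j, hj⟩) (by simp [List.get_eq_getElem, he])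
      simp only [Fin.mk.injEq] at hinj
      omega
    · rcases lt_or_gt_of_ne he with hlt | hgt
      · exact Or.inl ⟨abs_pos.mpr (sub_ne_zero.mpr he), l[j], List.getElem_mem hj,
          l[i], List.getElem_mem hi,
          by rw [abs_of_neg (show l[i] - l[j] < 0 by linarith)]; ring⟩
      · exact Or.inl ⟨abs_pos.mpr (sub_ne_zero.mpr he), l[i], List.getElem_mem hi,
          l[j], List.getElem_mem hj,
          by rw [abs_of_pos (show (0:Int) < l[i] - l[j] by linarith)]⟩
  · rintro (⟨hv, x, hx, y, hy, rfl⟩ | ⟨rfl, hd⟩)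
    · obtain ⟨i, hi, rfl⟩ := List.mem_iff_getElem.mp hx
      obtain ⟨j, hj, rfl⟩ := List.mem_iff_getElem.mp hy
      have hij : i ≠ j := by rintro rfl; omega
      rcases lt_or_gt_of_ne hij with h | h
      · exact ⟨i, j, hi, hj, h, (abs_of_pos hv).symm⟩
      · exact ⟨j, i, hj, hi, h, by rw [abs_sub_comm, abs_of_pos hv]⟩
    · rw [List.nodup_iff_injective_get] at hd
      simp only [Function.Injective, not_forall] at hd
      obtain ⟨⟨i, hi⟩, ⟨j, hj⟩, heq, hne⟩ := hd
      simp only [List.get_eq_getElem] at heq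
      have hij : i ≠ j := by intro h; exact hne (by simp [h])
      rcases lt_or_gt_of_ne hij with h | h
      · exact ⟨i, j, hi, hj, h, by rw [heq]; simp⟩
      · exact ⟨j, i, hj, hi, h, by rw [heq]; simp⟩

lemma pairGood_perm {l l' : List Int} (h : l.Perm l') (v : Int) :
    PairGood l v ↔ PairGood l' v := by
  rw [pairGood_iff_val, pairGood_iff_val]
  constructor <;> rintro (⟨hv, x, hx, y, hy, hxy⟩ | ⟨rfl, hd⟩)
  · exact Or.inl ⟨hv, x, h.mem_iff.mp hx, y, h.mem_iff.mp hy, hxy⟩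
  · exact Or.inr ⟨rfl, fun hn => hd (h.nodup_iff.mpr hn)⟩
  · exact Or.inl ⟨hv, x, h.mem_iff.mpr hx, y, h.mem_iff.mpr hy, hxy⟩
  · exact Or.inr ⟨rfl, fun hn => hd (h.nodup_iff.mp hn)⟩

lemma isMaxAns_perm {l l' : List Int} (h : l.Perm l') {d m : Int}
    (hm : IsMaxAns l d m) : IsMaxAns l' d m := by
  obtain ⟨ub, c⟩ := hm
  refine ⟨fun v hv => ub v ((pairGood_perm h v).mpr hv), ?_⟩
  rcases c with rfl | ⟨g, le⟩
  · exact Or.inl rfl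
  · exact Or.inr ⟨(pairGood_perm h m).mp g, le⟩

-- ---- A-side: the nested loops compute the max eligible pair difference ----

def istep (l : List Int) (d i : Int) : Int → Int → Int := fun best j =>
  let diff := |PySem.List.pyGetD l i 0 - PySem.List.pyGetD l j 0|
  if diff ≤ d ∧ best < diff then diff else best

def ostep (l : List Int) (d : Int) : Int → Int → Int := fun best i =>
  (PySem.List.pyRange (i + 1) (l.length : Int) 1).foldl (istep l d i) best

lemma differentValues_eq (a : List Int) (d : Int) :
    differentValues a d = (PySem.List.pyRange 0 (a.length : Int) 1).foldl (ostep a d) (-1) := rfl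

lemma getD_eq (l : List Int) (k : Nat) (h : k < l.length) :
    PySem.List.pyGetD l (k : Int) 0 = l[k] := by
  simp [PySem.List.pyGetD_natCast, List.getD_eq_getElem?_getD, List.getElem?_eq_getElem h]

lemma A_inner (l : List Int) (d : Int) (i : Nat) (hil : i < l.length) :
    ∀ u : Nat, u ≤ l.length → ∀ best : Int,
    best ≤ (PySem.List.pyRange ((i : Int) + 1) (u : Int) 1).foldl (istep l d i) best ∧
    ((PySem.List.pyRange ((i : Int) + 1) (u : Int) 1).foldl (istep l d i) best = best ∨
      ∃ j, ∃ hj : j < l.length, i < j ∧ j < u ∧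
        (PySem.List.pyRange ((i : Int) + 1) (u : Int) 1).foldl (istep l d i) best = |l[i] - l[j]| ∧
        |l[i] - l[j]| ≤ d) ∧
    (∀ j, ∀ hj : j < l.length, i < j → j < u → |l[i] - l[j]| ≤ d →
      |l[i] - l[j]| ≤ (PySem.List.pyRange ((i : Int) + 1) (u : Int) 1).foldl (istep l d i) best) := by
  intro u
  induction u with
  | zero =>
    intro _ best
    rw [PySem.List.pyRange_one_eq_nil (by omega : ((0:Nat):Int) ≤ (i:Int) + 1)]
    exact ⟨le_refl _, Or.inl rfl, fun j hj h1 h2 _ => absurd h2 (by omega)⟩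
  | succ u ihu =>
    intro hu best
    by_cases hiu : i + 1 ≤ u
    · rw [show ((u + 1 : Nat) : Int) = (u : Int) + 1 by push_cast; ring,
         PySem.List.pyRange_one_succ_right (by exact_mod_cast hiu), List.foldl_append]
      obtain ⟨h1, h2, h3⟩ := ihu (by omega) best
      set r := (PySem.List.pyRange ((i : Int) + 1) (u : Int) 1).foldl (istep l d i) best with hr
      have hul : u < l.length := by omega
      have hstep : (List.foldl (istep l d i) r [(u : Int)]) =
          if |l[i] - l[u]| ≤ d ∧ r < |l[i] - l[u]| then |l[i] - l[u]| else r := by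
        simp [istep, getD_eq l i hil, getD_eq l u hul]
      rw [hstep]
      split_ifs with hc
      · refine ⟨by omega, Or.inr ⟨u, hul, by omega, by omega, rfl, hc.1⟩, ?_⟩
        intro j hj hij hju hjd
        by_cases hju' : j = u
        · subst hju'; omega
        · have := h3 j hj hij (by omega) hjd; omega
      · refine ⟨h1, ?_, ?_⟩
        · rcases h2 with h | ⟨j, hj, a1, a2, a3, a4⟩
          · exact Or.inl h
          · exact Or.inr ⟨j, hj, a1, by omega, a3, a4⟩
        · intro j hj hij hju hjd
          by_cases hju' : j = u
          · subst hju'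
            rcases not_and_or.mp hc with h | h
            · exact absurd hjd h
            · omega
          · exact h3 j hj hij (by omega) hjd
    · rw [PySem.List.pyRange_one_eq_nil (by exact_mod_cast (by omega : u + 1 ≤ i + 1))]
      exact ⟨le_refl _, Or.inl rfl, fun j hj h1 h2 _ => absurd h1 (by omega)⟩

lemma A_outer (l : List Int) (d : Int) :
    ∀ t : Nat, t ≤ l.length →
    ((PySem.List.pyRange 0 (t : Int) 1).foldl (ostep l d) (-1) = -1 ∨
      ∃ i j, ∃ hi : i < l.length, ∃ hj : j < l.length, i < j ∧ i < t ∧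
        (PySem.List.pyRange 0 (t : Int) 1).foldl (ostep l d) (-1) = |l[i] - l[j]| ∧
        |l[i] - l[j]| ≤ d) ∧
    (∀ i j, ∀ hi : i < l.length, ∀ hj : j < l.length, i < j → i < t → |l[i] - l[j]| ≤ d →
      |l[i] - l[j]| ≤ (PySem.List.pyRange 0 (t : Int) 1).foldl (ostep l d) (-1)) := by
  intro t
  induction t with
  | zero =>
    intro _
    rw [PySem.List.pyRange_one_eq_nil (by omega : ((0:Nat):Int) ≤ 0)]
    exact ⟨Or.inl rfl, fun i j hi hj h1 h2 _ => absurd h2 (by omega)⟩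
  | succ t ih =>
    intro ht
    rw [show ((t + 1 : Nat) : Int) = (t : Int) + 1 by push_cast; ring,
       PySem.List.pyRange_one_succ_right (by omega : (0:Int) ≤ (t : Int)), List.foldl_append]
    obtain ⟨h2, h3⟩ := ih (by omega)
    set r := (PySem.List.pyRange 0 (t : Int) 1).foldl (ostep l d) (-1) with hr
    simp only [List.foldl_cons, List.foldl_nil]
    have htl : t < l.length := by omega
    obtain ⟨g1, g2, g3⟩ := A_inner l d t htl l.length (le_refl _) r
    have hostep : ostep l d r (t : Int) =
        (PySem.List.pyRange ((t : Int) + 1) ((l.length : Nat) : Int) 1).foldl (istep l d (t : Int)) r := rfl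
    constructor
    · rcases g2 with heq | ⟨j, hj, hij, hju, heq, hle⟩
      · rw [hostep, heq]
        rcases h2 with h | ⟨i, j, hi, hj, hij, hit, heq2, hle2⟩
        · exact Or.inl h
        · exact Or.inr ⟨i, j, hi, hj, hij, by omega, heq2, hle2⟩
      · exact Or.inr ⟨t, j, htl, hj, hij, by omega, by rw [hostep, heq], hle⟩
    · intro i j hi hj hij hit hjd
      by_cases hit' : i = t
      · subst hit'
        rw [hostep]
        exact g3 j hj hij hj hjd
      · have hh := h3 i j hi hj hij (by omega) hjd
        have : r ≤ ostep l d r (t : Int) := by rw [hostep]; exact g1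
        omega

lemma A_isMaxAns (a : List Int) (d : Int) : IsMaxAns a d (differentValues a d) := by
  rw [differentValues_eq]
  obtain ⟨h2, h3⟩ := A_outer a d a.length (le_refl _)
  constructor
  · rintro v ⟨i, j, hi, hj, hij, rfl⟩ hvd
    exact h3 i j hi hj hij hi hvd
  · rcases h2 with h | ⟨i, j, hi, hj, hij, _, heq, hle⟩
    · exact Or.inl h
    · exact Or.inr ⟨⟨i, j, hi, hj, hij, heq⟩, by omega⟩

-- ---- B-side: sort + binary search computes the same on the sorted list ----

lemma getD_eq2 (l : List Int) (k : Nat) (h : k < l.length) : l.getD k 0 = l[k] := by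
  simp [List.getD_eq_getElem?_getD, List.getElem?_eq_getElem h]

lemma bsearchGt_spec (s : List Int) (x : Int)
    (mono : ∀ p q : Nat, p ≤ q → q < s.length → s.getD p 0 ≤ s.getD q 0) :
    ∀ fuel lo hi : Nat, lo ≤ hi → hi ≤ s.length → hi - lo ≤ fuel →
    lo ≤ bsearchGt s x fuel lo hi ∧ bsearchGt s x fuel lo hi ≤ hi ∧
    (∀ k, lo ≤ k → k < bsearchGt s x fuel lo hi → s.getD k 0 ≤ x) ∧
    (∀ k, bsearchGt s x fuel lo hi ≤ k → k < hi → x < s.getD k 0) := by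
  intro fuel
  induction fuel with
  | zero =>
    intro lo hi hle hlen hf
    have : lo = hi := by omega
    subst this
    exact ⟨le_refl _, le_refl _, fun k h1 h2 => absurd h2 (by simp [bsearchGt]; omega),
      fun k h1 h2 => absurd h2 (by simp [bsearchGt] at h1; omega)⟩
  | succ fuel ih =>
    intro lo hi hle hlen hf
    rw [bsearchGt]
    by_cases hlh : lo < hi
    · simp only [hlh, if_true]
      set mid := (lo + hi) / 2 with hmid
      have hmlo : lo ≤ mid := by omega
      have hmhi : mid < hi := by omega
      by_cases hc : s.getD mid 0 ≤ x
      · simp only [hc, if_true]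
        obtain ⟨h1, h2, h3, h4⟩ := ih (mid + 1) hi (by omega) hlen (by omega)
        refine ⟨by omega, h2, ?_, h4⟩
        intro k hk1 hk2
        by_cases hkm : k ≤ mid
        · exact le_trans (mono k mid hkm (by omega)) hc
        · exact h3 k (by omega) hk2
      · simp only [hc, if_false]
        obtain ⟨h1, h2, h3, h4⟩ := ih lo mid (by omega) (by omega) (by omega)
        refine ⟨h1, by omega, h3, ?_⟩
        intro k hk1 hk2
        by_cases hkm : mid ≤ k
        · exact lt_of_lt_of_le (lt_of_not_ge hc) (mono mid k hkm (by omega))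
        · exact h4 k hk1 (by omega)
    · simp only [hlh, if_false]
      refine ⟨le_refl _, hle, ?_, ?_⟩ <;> intro k h1 h2 <;> omega

def bstep (s : List Int) (d : Int) : Int → Nat → Int := fun best i =>
  let lo := bsearchGt s (s.getD i 0 + d) (s.length + 1) (i + 1) s.length
  if lo - 1 > i then
    let c := s.getD (lo - 1) 0 - s.getD i 0
    if c > best then c else best
  else best

lemma differentValues_alt_eq (a : List Int) (d : Int) :
    differentValues_alt a d =
      (List.range (PySem.List.sorted a (fun x => x) false).length).foldl
        (bstep (PySem.List.sorted a (fun x => x) false) d) (-1) := rfl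

lemma B_outer (s : List Int) (d : Int)
    (mono : ∀ p q : Nat, p ≤ q → q < s.length → s.getD p 0 ≤ s.getD q 0) :
    ∀ t : Nat, t ≤ s.length →
    ((List.range t).foldl (bstep s d) (-1) = -1 ∨
      (PairGood s ((List.range t).foldl (bstep s d) (-1)) ∧
        (List.range t).foldl (bstep s d) (-1) ≤ d)) ∧
    (∀ i j, ∀ hi : i < s.length, ∀ hj : j < s.length, i < j → i < t → s[j] - s[i] ≤ d →
      s[j] - s[i] ≤ (List.range t).foldl (bstep s d) (-1)) := by
  intro t
  induction t with
  | zero =>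
    intro _
    exact ⟨Or.inl rfl, fun i j hi hj h1 h2 _ => absurd h2 (by omega)⟩
  | succ t ih =>
    intro ht
    rw [List.range_succ, List.foldl_append]
    obtain ⟨h2, h3⟩ := ih (by omega)
    set r := (List.range t).foldl (bstep s d) (-1) with hr
    simp only [List.foldl_cons, List.foldl_nil]
    have htl : t < s.length := by omega
    obtain ⟨b1, b2, b3, b4⟩ := bsearchGt_spec s (s.getD t 0 + d) mono
      (s.length + 1) (t + 1) s.length (by omega) (le_refl _) (by omega)
    set lo := bsearchGt s (s.getD t 0 + d) (s.length + 1) (t + 1) s.length with hlo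
    have hbstep : bstep s d r t =
        if lo - 1 > t then
          (if s.getD (lo - 1) 0 - s.getD t 0 > r then s.getD (lo - 1) 0 - s.getD t 0 else r)
        else r := rfl
    rw [hbstep]
    by_cases hgt : lo - 1 > t
    · simp only [hgt, if_true]
      have hlo1 : lo - 1 < s.length := by omega
      set c := s.getD (lo - 1) 0 - s.getD t 0 with hc
      have hcd : c ≤ d := by
        have := b3 (lo - 1) (by omega) (by omega)
        omega
      have hmn : s.getD t 0 ≤ s.getD (lo - 1) 0 := mono t (lo - 1) (by omega) hlo1
      have hpg : PairGood s c := by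
        refine ⟨t, lo - 1, htl, hlo1, by omega, ?_⟩
        rw [← getD_eq2 s t htl, ← getD_eq2 s (lo - 1) hlo1, abs_of_nonpos (by omega)]
        omega
      constructor
      · split_ifs with hcr
        · exact Or.inr ⟨hpg, hcd⟩
        · rcases h2 with h | h
          · exact Or.inl h
          · exact Or.inr h
      · intro i j hi hj hij hit hjd
        by_cases hit' : i = t
        · subst hit'
          have hjlo : j < lo := by
            by_contra hjge
            have := b4 j (by omega) hj
            rw [getD_eq2 s j hj, getD_eq2 s i htl] at this
            omega
          have : s.getD j 0 ≤ s.getD (lo - 1) 0 := mono j (lo - 1) (by omega) hlo1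
          rw [getD_eq2 s j hj] at this
          have hct : s[j] - s[i] ≤ c := by
            rw [hc, getD_eq2 s i htl]
            omega
          split_ifs <;> omega
        · have := h3 i j hi hj hij (by omega) hjd
          split_ifs <;> omega
    · simp only [hgt, if_false]
      refine ⟨h2, ?_⟩
      intro i j hi hj hij hit hjd
      by_cases hit' : i = t
      · subst hit'
        exfalso
        have hjlo : j < lo := by
          by_contra hjge
          have := b4 j (by omega) hj
          rw [getD_eq2 s j hj, getD_eq2 s i htl] at this
          omega
        omega
      · exact h3 i j hi hj hij (by omega) hjd

lemma B_isMaxAns (a : List Int) (d : Int) :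
    IsMaxAns (PySem.List.sorted a (fun x => x) false) d (differentValues_alt a d) := by
  set s := PySem.List.sorted a (fun x => x) false with hs
  have mono : ∀ p q : Nat, p ≤ q → q < s.length → s.getD p 0 ≤ s.getD q 0 := by
    intro p q hpq hq
    rw [getD_eq2 s p (by omega), getD_eq2 s q hq]
    exact PySem.List.sorted_id_getElem_mono a hpq hq
  have monoE : ∀ (i j : Nat) (hi : i < s.length) (hj : j < s.length), i ≤ j → s[i] ≤ s[j] :=
    fun i j hi hj hij => PySem.List.sorted_id_getElem_mono a hij hj
  rw [differentValues_alt_eq]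
  obtain ⟨h2, h3⟩ := B_outer s d mono s.length (le_refl _)
  constructor
  · rintro v ⟨i, j, hi, hj, hij, rfl⟩ hvd
    rw [abs_of_nonpos (by have := monoE i j hi hj (le_of_lt hij); omega)]
    have heq : -(s[i] - s[j]) = s[j] - s[i] := by ring
    rw [heq]
    refine h3 i j hi hj hij hi ?_
    rw [abs_of_nonpos (by have := monoE i j hi hj (le_of_lt hij); omega)] at hvd
    omega
  · exact h2

-- ===== VERDICT (by name: the statement is the Claim_ definition above) =====
theorem differentValues_spec : Claim_equal_differentValues := by
  intro a d _
  show differentValues a d = differentValues_alt a d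
  exact isMaxAns_unique (A_isMaxAns a d)
    (isMaxAns_perm (PySem.List.sorted_perm a (fun x => x) false) (B_isMaxAns a d))
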